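-- pv_equiv track=rewrite | github.com/yiyan023/Data-Structures | Formation/Rising Tide Winner.py | risingTideWinner
-- ===== SOURCE A (Python) =====
-- from collections import defaultdict
--
-- def risingTideWinner(nominations: list[str]) -> str:
--     counter = defaultdict(int)
--     max_nom, max_name = 0, None
--
--     for nom in nominations:
--         counter[nom] += 1
--
--         if (counter[nom] > max_nom) or (counter[nom] == max_nom and nom > max_name):
--             max_nom = counter[nom]
--             max_name = nom
--
--     return max_name
-- ===== SOURCE B (Python) =====
-- from collections import Counter
--
--
-- def risingTideWinner(nominations: list[str]) -> str:
--     # Two phases: tally all nominations, then pick the name maximizing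
--     # (count, name) lexicographically. Empty input -> None.
--     if not nominations:
--         return None
--     counts = Counter(nominations)
--     return max(counts, key=lambda n: (counts[n], n))
-- ===== Notes on version B (the rewrite author's own statement) =====
-- stated objective: simpler
-- what changed: A's single fused loop (incremental counting interleaved with a running-max update per occurrence) is split into two phases: build the full frequency table with Counter, then select the winner as the key maximizing (count, name); the empty case is an explicit early return of None.
import Mathlib
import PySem

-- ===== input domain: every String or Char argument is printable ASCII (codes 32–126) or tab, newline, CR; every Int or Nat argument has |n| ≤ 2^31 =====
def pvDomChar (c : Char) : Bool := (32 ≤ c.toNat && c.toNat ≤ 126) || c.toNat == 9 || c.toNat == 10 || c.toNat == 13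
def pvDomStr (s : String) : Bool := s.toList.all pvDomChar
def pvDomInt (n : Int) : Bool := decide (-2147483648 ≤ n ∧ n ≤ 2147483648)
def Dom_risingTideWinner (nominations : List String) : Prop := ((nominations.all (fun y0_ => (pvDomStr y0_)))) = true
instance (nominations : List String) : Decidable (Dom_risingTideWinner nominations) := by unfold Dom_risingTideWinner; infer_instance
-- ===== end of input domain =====

-- B replaces A's fused count-and-running-max loop with two phases (Counter, then argmax by (count, name)); same cost, simpler shape.


-- ===== PORT A =====
-- A's loop: counter[nom] += 1; update (max_nom, max_name) when the new count beats the
-- running max, or ties it and the name is larger.  'nom > max_name' with max_name = None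
-- is unreachable in Python (the 'or' short-circuits on the first iteration); the
-- 'none => false' arm mirrors that dead branch.
def risingTideWinner (nominations : List String) : Option String :=
  (nominations.foldl
    (fun (st : PySem.Dict String Int × Int × Option String) nom =>
      let counter := st.1.modify nom 0 (· + 1)
      let c := counter.getD nom 0
      if c > st.2.1 || (c == st.2.1 &&
          (match st.2.2 with | none => false | some w => decide (w < nom))) then
        (counter, c, some nom)
      else
        (counter, st.2.1, st.2.2))
    (PySem.Dict.empty, 0, none)).2.2

-- ===== PORT B =====
-- Source B: counts = Counter(nominations); max(counts, key=lambda n: (counts[n], n)) —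
-- max over the keys with a lexicographic tuple key, written as the explicit running
-- maximum over the key list (tuple '<' in Lean is pointwise, so the lexicographic
-- comparison is spelled out componentwise).
def risingTideWinner_alt (nominations : List String) : Option String :=
  match nominations with
  | [] => none
  | _ =>
    let counts := PySem.Dict.counter nominations
    match counts.keys with
    | [] => none
    | k :: ks =>
      some (ks.foldl
        (fun best n =>
          if counts.getD n 0 > counts.getD best 0 ||
             (counts.getD n 0 == counts.getD best 0 && decide (best < n)) then n else best) k)

-- ===== PRECONDITION & SPEC =====
def Spec_risingTideWinner (nominations : List String) (out : Option String) : Prop := out = risingTideWinner_alt nominations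
instance (nominations : List String) (out : Option String) : Decidable (Spec_risingTideWinner nominations out) := by unfold Spec_risingTideWinner; infer_instance

-- ===== CLAIM (what is proved, stated in full; the proofs are below) =====
def Claim_equal_risingTideWinner : Prop := ∀ (nominations : List String), Dom_risingTideWinner nominations → Spec_risingTideWinner nominations (risingTideWinner nominations)

-- ===== LEMMAS AND PROOFS =====

-- 'k is (count, name)-dominated by w' for a given count function.
def domR (cnt : String → Int) (k w : String) : Prop :=
  cnt k < cnt w ∨ (cnt k = cnt w ∧ k ≤ w)

theorem domR_refl (cnt : String → Int) (k : String) : domR cnt k k :=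
  Or.inr ⟨rfl, le_refl k⟩

theorem domR_trans {cnt : String → Int} {a b c : String}
    (h1 : domR cnt a b) (h2 : domR cnt b c) : domR cnt a c := by
  rcases h1 with h1 | ⟨h1, h1'⟩ <;> rcases h2 with h2 | ⟨h2, h2'⟩
  · exact Or.inl (lt_trans h1 h2)
  · exact Or.inl (h2 ▸ h1)
  · exact Or.inl (h1 ▸ h2)
  · exact Or.inr ⟨h1.trans h2, le_trans h1' h2'⟩

theorem domR_antisymm {cnt : String → Int} {a b : String}
    (h1 : domR cnt a b) (h2 : domR cnt b a) : a = b := by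
  rcases h1 with h1 | ⟨h1, h1'⟩ <;> rcases h2 with h2 | ⟨h2, h2'⟩ <;>
    first
    | exact absurd h2 (by omega)
    | exact le_antisymm h1' h2'

-- The Bool test both loops use, read as domR.
theorem cond_true_domR {cnt : String → Int} {b n : String}
    (h : (cnt n > cnt b || (cnt n == cnt b && decide (b < n))) = true) : domR cnt b n := by
  simp only [Bool.or_eq_true, Bool.and_eq_true, decide_eq_true_eq, beq_iff_eq, gt_iff_lt] at h
  rcases h with h | ⟨h, h'⟩
  · exact Or.inl h
  · exact Or.inr ⟨h.symm, le_of_lt h'⟩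

theorem cond_false_domR {cnt : String → Int} {b n : String}
    (h : (cnt n > cnt b || (cnt n == cnt b && decide (b < n))) = false) : domR cnt n b := by
  simp only [Bool.or_eq_false_iff, Bool.and_eq_false_iff, decide_eq_false_iff_not,
    beq_eq_false_iff_ne, ne_eq, gt_iff_lt, not_lt] at h
  rcases h with ⟨h1, h2 | h2⟩
  · rcases lt_or_eq_of_le h1 with h | h
    · exact Or.inl h
    · exact absurd h h2
  · rcases lt_or_eq_of_le h1 with h | h
    · exact Or.inl h
    · exact Or.inr ⟨h, h2⟩

-- B's running-max fold: its result is among the candidates and dominates them all.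
theorem bfold_spec (cnt : String → Int) (ks : List String) (b : String) :
    (ks.foldl (fun best n =>
        if cnt n > cnt best || (cnt n == cnt best && decide (best < n)) then n else best) b = b ∨
     ks.foldl (fun best n =>
        if cnt n > cnt best || (cnt n == cnt best && decide (best < n)) then n else best) b ∈ ks) ∧
    ∀ k, (k = b ∨ k ∈ ks) →
      domR cnt k (ks.foldl (fun best n =>
        if cnt n > cnt best || (cnt n == cnt best && decide (best < n)) then n else best) b) := by
  induction ks generalizing b with
  | nil =>
    refine ⟨Or.inl rfl, ?_⟩
    rintro k (rfl | hk)
    · exact domR_refl cnt k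
    · cases hk
  | cons n ks ih =>
    simp only [List.foldl_cons]
    by_cases hc : (cnt n > cnt b || (cnt n == cnt b && decide (b < n))) = true
    · rw [if_pos hc]
      obtain ⟨hmem, hdom⟩ := ih n
      refine ⟨?_, ?_⟩
      · rcases hmem with h | h
        · exact Or.inr (by rw [h]; exact List.mem_cons_self)
        · exact Or.inr (List.mem_cons_of_mem _ h)
      · rintro k (rfl | hk)
        · exact domR_trans (cond_true_domR hc) (hdom n (Or.inl rfl))
        · rcases List.mem_cons.mp hk with rfl | hk
          · exact hdom k (Or.inl rfl)
          · exact hdom k (Or.inr hk)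
    · rw [if_neg hc]
      obtain ⟨hmem, hdom⟩ := ih b
      refine ⟨?_, ?_⟩
      · rcases hmem with h | h
        · exact Or.inl h
        · exact Or.inr (List.mem_cons_of_mem _ h)
      rintro k (rfl | hk)
      · exact hdom k (Or.inl rfl)
      · rcases List.mem_cons.mp hk with rfl | hk
        · exact domR_trans (cond_false_domR (Bool.not_eq_true _ ▸ hc)) (hdom b (Or.inl rfl))
        · exact hdom k (Or.inr hk)

-- A's loop step, named for the proofs (definitionally the lambda inside risingTideWinner).
def aStep (st : PySem.Dict String Int × Int × Option String) (nom : String) :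
    PySem.Dict String Int × Int × Option String :=
  let counter := st.1.modify nom 0 (· + 1)
  let c := counter.getD nom 0
  if c > st.2.1 || (c == st.2.1 &&
      (match st.2.2 with | none => false | some w => decide (w < nom))) then
    (counter, c, some nom)
  else
    (counter, st.2.1, st.2.2)

theorem risingTideWinner_eq_aStep (l : List String) :
    risingTideWinner l = (l.foldl aStep (PySem.Dict.empty, 0, none)).2.2 := rfl

-- Invariant of A's running (max_nom, max_name) over the processed prefix l.
def aInv (l : List String) (m : Int) (o : Option String) : Prop :=
  match o with
  | none => l = [] ∧ m = 0
  | some w => w ∈ l ∧ m = (l.count w : Int) ∧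
      ∀ k ∈ l, domR (fun n => (l.count n : Int)) k w

theorem aloop_inv (l : List String) :
    (l.foldl aStep (PySem.Dict.empty, 0, none)).1 = PySem.Dict.counter l ∧
    aInv l (l.foldl aStep (PySem.Dict.empty, 0, none)).2.1
          (l.foldl aStep (PySem.Dict.empty, 0, none)).2.2 := by
  induction l using List.reverseRecOn with
  | nil => exact ⟨rfl, rfl, rfl⟩
  | append_singleton l x ih =>
    obtain ⟨hd, hinv⟩ := ih
    rw [List.foldl_append, List.foldl_cons, List.foldl_nil]
    set st := l.foldl aStep (PySem.Dict.empty, 0, none) with hst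
    obtain ⟨d, m, o⟩ := st
    simp only at hd hinv ⊢
    subst hd
    have hcount : ∀ k : String, (l ++ [x]).count k = l.count k + (if x = k then 1 else 0) := by
      intro k; simp [List.count_append, List.count_singleton]
    unfold aStep
    dsimp only
    rw [PySem.Dict.getD_modify_self, PySem.Dict.getD_counter,
      ← PySem.Dict.counter_append_singleton]
    cases o with
    | none =>
      obtain ⟨rfl, rfl⟩ := hinv
      simp only [List.count_nil, List.nil_append, Int.natCast_zero]
      rw [if_pos (by norm_num)]
      refine ⟨rfl, List.mem_singleton_self x, by simp, ?_⟩
      intro k hk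
      rcases List.mem_singleton.mp hk with rfl
      exact domR_refl _ k
    | some w =>
      obtain ⟨hw, hm, hdom⟩ := hinv
      subst hm
      by_cases hcond : ((decide ((l.count x : Int) + 1 > (l.count w : Int))) ||
          (((l.count x : Int) + 1 == (l.count w : Int)) && decide (w < x))) = true
      · rw [if_pos hcond]
        have hcnd : (l.count w : Int) < (l.count x : Int) + 1 ∨
            ((l.count x : Int) + 1 = (l.count w : Int) ∧ w < x) := by
          simp only [Bool.or_eq_true, Bool.and_eq_true, decide_eq_true_eq, beq_iff_eq,
            gt_iff_lt] at hcond
          exact hcond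
        refine ⟨rfl, List.mem_append.mpr (Or.inr (List.mem_singleton_self x)), ?_, ?_⟩
        · rw [hcount x]; simp
        · intro k hk
          by_cases hkx : k = x
          · subst hkx; exact domR_refl _ k
          · have hkl : k ∈ l := by
              rcases List.mem_append.mp hk with h | h
              · exact h
              · exact absurd (List.mem_singleton.mp h) hkx
            have hck : ((l ++ [x]).count k : Int) = (l.count k : Int) := by
              rw [hcount k, if_neg (fun h => hkx h.symm)]; push_cast; ring
            have hcx : ((l ++ [x]).count x : Int) = (l.count x : Int) + 1 := by
              rw [hcount x]; simp
            have hdk := hdom k hkl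
            unfold domR at hdk ⊢
            dsimp only at hdk ⊢
            rw [hck, hcx]
            rcases hcnd with h | ⟨h, hwx⟩
            · rcases hdk with h2 | ⟨h2, _⟩
              · left; omega
              · left; omega
            · rcases hdk with h2 | ⟨h2, hkw⟩
              · left; omega
              · right; exact ⟨by omega, le_trans hkw (le_of_lt hwx)⟩
      · rw [if_neg hcond]
        have hcnd : (l.count x : Int) + 1 ≤ (l.count w : Int) ∧
            ((l.count x : Int) + 1 = (l.count w : Int) → x ≤ w) := by
          simp only [Bool.or_eq_true, Bool.and_eq_true, decide_eq_true_eq, beq_iff_eq,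
            gt_iff_lt, not_or, not_and, not_lt] at hcond
          exact hcond
        have hwx : w ≠ x := by
          intro h
          subst h
          omega
        have hcw : ((l ++ [x]).count w : Int) = (l.count w : Int) := by
          rw [hcount w, if_neg (fun h => hwx h.symm)]; push_cast; ring
        refine ⟨rfl, List.mem_append.mpr (Or.inl hw), hcw.symm, ?_⟩
        intro k hk
        by_cases hkx : k = x
        · unfold domR
          dsimp only
          have hcxk : ((l ++ [x]).count k : Int) = (l.count x : Int) + 1 := by
            rw [hcount k, if_pos hkx.symm, hkx]; push_cast; ring
          rw [hcxk, hcw, hkx]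
          rcases lt_or_eq_of_le hcnd.1 with h | h
          · left; exact h
          · right; exact ⟨h, hcnd.2 h⟩
        · have hkl : k ∈ l := by
            rcases List.mem_append.mp hk with h | h
            · exact h
            · exact absurd (List.mem_singleton.mp h) hkx
          have hck : ((l ++ [x]).count k : Int) = (l.count k : Int) := by
            rw [hcount k, if_neg (fun h => hkx h.symm)]; push_cast; ring
          have hdk := hdom k hkl
          unfold domR at hdk ⊢
          dsimp only at hdk ⊢
          rw [hck, hcw]
          exact hdk

-- ===== VERDICT (by name: the statement is the Claim_ definition above) =====
theorem risingTideWinner_spec : Claim_equal_risingTideWinner := by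
  unfold Claim_equal_risingTideWinner
  intro l _
  unfold Spec_risingTideWinner
  cases l with
  | nil => rfl
  | cons h t =>
    obtain ⟨-, hinv⟩ := aloop_inv (h :: t)
    rw [risingTideWinner_eq_aStep]
    have hne : (PySem.Dict.counter (h :: t)).keys ≠ [] := by
      intro hnil
      have hmem : h ∈ (PySem.Dict.counter (h :: t)).keys := by
        rw [PySem.Dict.keys_counter]
        exact (PySem.Set.mem_ofList _ _).mpr List.mem_cons_self
      rw [hnil] at hmem
      cases hmem
    obtain ⟨k, ks, hkk⟩ := List.exists_cons_of_ne_nil hne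
    have hB : risingTideWinner_alt (h :: t) = some (ks.foldl
        (fun best n =>
          if ((h :: t).count n : Int) > ((h :: t).count best : Int) ||
             (((h :: t).count n : Int) == ((h :: t).count best : Int) && decide (best < n))
          then n else best) k) := by
      unfold risingTideWinner_alt
      dsimp only
      rw [hkk]
      dsimp only
      simp only [PySem.Dict.getD_counter]
    rw [hB]
    obtain ⟨hres_mem, hres_dom⟩ :=
      bfold_spec (fun n => ((h :: t).count n : Int)) ks k
    set res := ks.foldl
        (fun best n =>
          if ((h :: t).count n : Int) > ((h :: t).count best : Int) ||
             (((h :: t).count n : Int) == ((h :: t).count best : Int) && decide (best < n))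
          then n else best) k with hres
    have hres_l : res ∈ (h :: t) := by
      have hkeys : res ∈ (PySem.Dict.counter (h :: t)).keys := by
        rw [hkk]
        rcases hres_mem with hr | hr
        · rw [hr]; exact List.mem_cons_self
        · exact List.mem_cons_of_mem _ hr
      rw [PySem.Dict.keys_counter] at hkeys
      exact (PySem.Set.mem_ofList _ _).mp hkeys
    cases ho : ((h :: t).foldl aStep (PySem.Dict.empty, 0, none)).2.2 with
    | none =>
      rw [ho] at hinv
      obtain ⟨hnil, -⟩ := hinv
      cases hnil
    | some w =>
      rw [ho] at hinv
      obtain ⟨hwl, hm, hdom⟩ := hinv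
      have hw_keys : w = k ∨ w ∈ ks := by
        have : w ∈ (PySem.Dict.counter (h :: t)).keys := by
          rw [PySem.Dict.keys_counter]
          exact (PySem.Set.mem_ofList _ _).mpr hwl
        rw [hkk] at this
        exact List.mem_cons.mp this
      have h1 : domR (fun n => ((h :: t).count n : Int)) w res := by
        rcases hw_keys with hw | hw
        · exact hres_dom w (Or.inl hw)
        · exact hres_dom w (Or.inr hw)
      have h2 : domR (fun n => ((h :: t).count n : Int)) res w := hdom res hres_l
      rw [domR_antisymm h2 h1]
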